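-- pv_equiv track=rewrite | github.com/ynotzort/advent_of_code | 2015/11/1.py | p_has2pairs
-- ===== SOURCE A (Python) =====
-- def p_has2pairs(p: tuple[int, ...]) -> bool:
--     n = len(p)
--     for i in range(n-3):
--         if p[i] == p[i+1]:
--             for j in range(i+1, n-1):
--                 if p[i] != p[j]:
--                     if p[j] == p[j+1]:
--                         return True
--     return False
-- ===== SOURCE B (Python) =====
-- def p_has2pairs(p: tuple[int, ...]) -> bool:
--     # One pass: collect the distinct values that form an adjacent equal pair;
--     # answer is True as soon as two distinct such values exist.
--     seen = set()
--     for a, b in zip(p, p[1:]):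
--         if a == b:
--             seen.add(a)
--             if len(seen) >= 2:
--                 return True
--     return False
-- ===== Notes on version B (the rewrite author's own statement) =====
-- stated objective: faster
-- what changed: Replaced the nested scan (for each adjacent pair, rescan the rest for a pair of a different value) by a single pass that collects the set of values forming adjacent pairs and stops once two distinct values are seen.
import Mathlib
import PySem

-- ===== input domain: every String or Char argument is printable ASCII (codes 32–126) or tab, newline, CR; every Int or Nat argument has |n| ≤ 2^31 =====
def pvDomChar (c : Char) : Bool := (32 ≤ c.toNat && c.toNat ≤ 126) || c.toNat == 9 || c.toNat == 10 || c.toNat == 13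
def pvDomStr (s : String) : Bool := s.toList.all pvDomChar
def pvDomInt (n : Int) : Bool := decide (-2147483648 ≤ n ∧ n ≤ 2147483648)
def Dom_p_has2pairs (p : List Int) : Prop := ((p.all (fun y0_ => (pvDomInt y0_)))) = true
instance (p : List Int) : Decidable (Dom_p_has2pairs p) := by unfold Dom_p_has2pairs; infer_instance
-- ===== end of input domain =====

-- B replaces A's nested rescan by a single pass collecting the set of values that form an
-- adjacent equal pair, returning True once two distinct such values are seen (O(n) vs O(n^2)).


-- ===== PORT A =====
-- every index used by A is provably in range (0 ≤ i < n-3, i+1 ≤ j < n-1), so pyGetD is exact here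
def p_has2pairs (p : List Int) : Bool :=
  let n : Int := p.length
  (PySem.List.pyRange 0 (n - 3) 1).any (fun i =>
    if PySem.List.pyGetD p i 0 == PySem.List.pyGetD p (i + 1) 0 then
      (PySem.List.pyRange (i + 1) (n - 1) 1).any (fun j =>
        if PySem.List.pyGetD p i 0 != PySem.List.pyGetD p j 0 then
          PySem.List.pyGetD p j 0 == PySem.List.pyGetD p (j + 1) 0
        else false)
    else false)

-- ===== PORT B =====
-- the loop of Source B: fold over zip(p, p[1:]) (p[1:] on a list is `List.drop 1`, exact),
-- maintaining the Python set `seen`, with the early `return True` as the `true` branch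
def altGo (seen : PySem.Set Int) : List (Int × Int) → Bool
  | [] => false
  | (a, b) :: rest =>
    if a == b then
      let s := PySem.Set.add seen a
      if 2 ≤ s.length then true else altGo s rest
    else altGo seen rest

def p_has2pairs_alt (p : List Int) : Bool :=
  altGo PySem.Set.empty (p.zip (p.drop 1))

-- ===== PRECONDITION & SPEC =====
def Spec_p_has2pairs (p : List Int) (out : Bool) : Prop := out = p_has2pairs_alt p
instance (p : List Int) (out : Bool) : Decidable (Spec_p_has2pairs p out) := by unfold Spec_p_has2pairs; infer_instance

-- ===== CLAIM (what is proved, stated in full; the proofs are below) =====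
def Claim_equal_p_has2pairs : Prop := ∀ (p : List Int), Dom_p_has2pairs p → Spec_p_has2pairs p (p_has2pairs p)

-- ===== LEMMAS AND PROOFS =====

-- the values that occur as an adjacent equal pair in p
def pvals (p : List Int) : List Int :=
  (p.zip (p.drop 1)).filterMap (fun ab => if ab.1 = ab.2 then some ab.1 else none)

theorem mem_pvals (p : List Int) (v : Int) :
    v ∈ pvals p ↔ ∃ k : ℕ, ∃ h : k + 1 < p.length, p[k] = p[k + 1] ∧ p[k] = v := by
  unfold pvals
  rw [List.mem_filterMap]
  constructor
  · rintro ⟨⟨a, b⟩, hab, hf⟩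
    obtain ⟨k, hk, hget⟩ := List.getElem_of_mem hab
    have hlen : k + 1 < p.length := by
      simp [List.length_zip] at hk
      omega
    have hz : (p.zip (p.drop 1))[k] = (p[k], p[k + 1]) := by
      simp [List.getElem_zip]
    rw [hz] at hget
    obtain ⟨ha, hb⟩ := Prod.mk.injEq .. ▸ hget.symm
    simp only at hf
    split at hf
    · rename_i heq
      refine ⟨k, hlen, ?_, ?_⟩ <;> simp_all
    · exact absurd hf (by simp)
  · rintro ⟨k, h, heq, hv⟩
    refine ⟨(p[k], p[k + 1]), ?_, by simp [← heq, hv]⟩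
    rw [List.mem_iff_getElem]
    refine ⟨k, by simp [List.length_zip]; omega, ?_⟩
    simp [List.getElem_zip]

-- A returns true as soon as a pair at k and a later pair of a different value at m exist
theorem pA_of (p : List Int) (k m : ℕ) (hkm : k < m) (hm : m + 1 < p.length)
    (h1 : p[k] = p[k + 1]) (h2 : p[m] = p[m + 1]) (hne : p[k] ≠ p[m]) :
    p_has2pairs p = true := by
  have hk1 : k + 1 < p.length := by omega
  have hm2 : k + 2 ≤ m := by
    by_contra hcon
    have : m = k + 1 := by omega
    subst this
    exact hne h1
  simp only [p_has2pairs, List.any_eq_true]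
  refine ⟨(k : Int), ?_, ?_⟩
  · rw [PySem.List.mem_pyRange_one]
    omega
  · have e1 : PySem.List.pyGetD p (k : Int) 0 = p[k] := by
      rw [PySem.List.pyGetD_eq_getElem (i := (k : Int)) p 0 (by omega) (by omega)]
      congr 1
      try omega
    have e2 : PySem.List.pyGetD p ((k : Int) + 1) 0 = p[k + 1] := by
      rw [PySem.List.pyGetD_eq_getElem (i := (k : Int) + 1) p 0 (by omega) (by omega)]
      congr 1
      try omega
    have e3 : PySem.List.pyGetD p (m : Int) 0 = p[m] := by
      rw [PySem.List.pyGetD_eq_getElem (i := (m : Int)) p 0 (by omega) (by omega)]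
      congr 1
      try omega
    have e4 : PySem.List.pyGetD p ((m : Int) + 1) 0 = p[m + 1] := by
      rw [PySem.List.pyGetD_eq_getElem (i := (m : Int) + 1) p 0 (by omega) (by omega)]
      congr 1
      try omega
    rw [e1, e2, if_pos (by simp [h1])]
    simp only [List.any_eq_true]
    refine ⟨(m : Int), ?_, ?_⟩
    · rw [PySem.List.mem_pyRange_one]
      omega
    · rw [e3, e4, if_pos (by simp [hne]), h2]
      simp

-- characterisation of A
theorem pA_iff (p : List Int) :
    p_has2pairs p = true ↔ ∃ x ∈ pvals p, ∃ y ∈ pvals p, x ≠ y := by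
  constructor
  · intro h
    simp only [p_has2pairs, List.any_eq_true] at h
    obtain ⟨i, hi, hinner⟩ := h
    rw [PySem.List.mem_pyRange_one] at hi
    split at hinner
    case isFalse => simp at hinner
    case isTrue houter =>
      simp only [List.any_eq_true] at hinner
      obtain ⟨j, hj, hcond⟩ := hinner
      rw [PySem.List.mem_pyRange_one] at hj
      split at hcond
      case isFalse => simp at hcond
      case isTrue hdiff =>
        have hk1 : i.toNat + 1 < p.length := by omega
        have hm1 : j.toNat + 1 < p.length := by omega
        have e1 : PySem.List.pyGetD p i 0 = p[i.toNat] :=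
          PySem.List.pyGetD_eq_getElem (i := i) p 0 (by omega) (by omega)
        have e2 : PySem.List.pyGetD p (i + 1) 0 = p[i.toNat + 1] := by
          rw [PySem.List.pyGetD_eq_getElem (i := i + 1) p 0 (by omega) (by omega)]
          congr 1
          omega
        have e3 : PySem.List.pyGetD p j 0 = p[j.toNat] :=
          PySem.List.pyGetD_eq_getElem (i := j) p 0 (by omega) (by omega)
        have e4 : PySem.List.pyGetD p (j + 1) 0 = p[j.toNat + 1] := by
          rw [PySem.List.pyGetD_eq_getElem (i := j + 1) p 0 (by omega) (by omega)]
          congr 1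
          omega
        rw [e1, e2] at houter
        rw [e3, e4] at hcond
        rw [e1, e3] at hdiff
        refine ⟨p[i.toNat], ?_, p[j.toNat], ?_, ?_⟩
        · exact (mem_pvals p _).2 ⟨i.toNat, hk1, by simpa using houter, rfl⟩
        · exact (mem_pvals p _).2 ⟨j.toNat, hm1, by simpa using hcond, rfl⟩
        · simpa using hdiff
  · rintro ⟨x, hx, y, hy, hxy⟩
    obtain ⟨k, hk, hk2, hkx⟩ := (mem_pvals p x).1 hx
    obtain ⟨m, hm, hm2, hmy⟩ := (mem_pvals p y).1 hy
    rcases Nat.lt_trichotomy k m with h | h | h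
    · exact pA_of p k m h hm hk2 hm2 (by rw [hkx, hmy]; exact hxy)
    · exfalso
      apply hxy
      subst h
      rw [← hkx, ← hmy]
    · exact pA_of p m k h hk hm2 hk2 (by rw [hkx, hmy]; exact fun e => hxy e.symm)

-- B-side: set length only grows
theorem len_le_add (s : PySem.Set Int) (x : Int) : s.length ≤ (PySem.Set.add s x).length := by
  rw [PySem.Set.add_eq_ite]
  split <;> simp

theorem len_le_update (xs : List Int) (s : PySem.Set Int) :
    s.length ≤ (PySem.Set.update s xs).length := by
  induction xs generalizing s with
  | nil => rw [PySem.Set.update_nil]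
  | cons x xs ih => rw [PySem.Set.update_cons]; exact (len_le_add s x).trans (ih _)

-- loop invariant for altGo
theorem altGo_iff (l : List (Int × Int)) (s : PySem.Set Int) (hnd : s.Nodup) (hle : s.length ≤ 1) :
    altGo s l = true ↔
      2 ≤ (PySem.Set.update s (l.filterMap (fun ab => if ab.1 = ab.2 then some ab.1 else none))).length := by
  induction l generalizing s with
  | nil =>
    simp only [altGo, List.filterMap_nil, PySem.Set.update_nil]
    constructor <;> intro h <;> [exact absurd h (by simp); omega]
  | cons ab rest ih =>
    obtain ⟨a, b⟩ := ab
    by_cases hab : a = b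
    · subst hab
      simp only [altGo, BEq.rfl, if_true, List.filterMap_cons, PySem.Set.update_cons]
      by_cases h2 : 2 ≤ (PySem.Set.add s a).length
      · rw [if_pos h2]
        simp only [true_iff]
        exact h2.trans (len_le_update _ _)
      · rw [if_neg h2]
        exact ih (PySem.Set.add s a) (PySem.Set.nodup_add s a hnd) (by omega)
    · simp only [altGo, List.filterMap_cons, if_neg hab, beq_eq_false_iff_ne.mpr hab]
      exact ih s hnd hle

theorem two_le_nodup (u : List Int) (h : u.Nodup) :
    2 ≤ u.length ↔ ∃ x ∈ u, ∃ y ∈ u, x ≠ y := by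
  match u with
  | [] => simp
  | [x] => simp
  | x :: y :: t =>
    simp only [List.nodup_cons, List.mem_cons] at h
    constructor
    · intro _
      exact ⟨x, by simp, y, by simp, fun e => h.1 (by simp [e])⟩
    · intro _
      simp

-- characterisation of B
theorem pB_iff (p : List Int) :
    p_has2pairs_alt p = true ↔ ∃ x ∈ pvals p, ∃ y ∈ pvals p, x ≠ y := by
  have hofl : PySem.Set.update PySem.Set.empty (pvals p) = PySem.Set.ofList (pvals p) := by
    rw [PySem.Set.ofList_eq_foldl]; rfl
  rw [p_has2pairs_alt, altGo_iff _ _ (by simp [PySem.Set.empty]) (by simp [PySem.Set.empty])]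
  rw [show (p.zip (p.drop 1)).filterMap (fun ab => if ab.1 = ab.2 then some ab.1 else none) = pvals p from rfl]
  rw [hofl, two_le_nodup _ (PySem.Set.nodup_ofList _)]
  simp [PySem.Set.mem_ofList]

-- ===== VERDICT (by name: the statement is the Claim_ definition above) =====
theorem p_has2pairs_spec : Claim_equal_p_has2pairs := by
  intro p _
  unfold Spec_p_has2pairs
  exact Bool.eq_iff_iff.mpr (by simpa using (pA_iff p).trans (pB_iff p).symm)
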